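-- pv_equiv track=rewrite | github.com/AdamZhouSE/pythonHomework | Code/CodeRecords/2630/60602/280877.py | swimJudge
-- ===== SOURCE A (Python) =====
-- def swimJudge(i,j,map):
--     if(i==len(map)-1 and j==len(map[0])-1 and map[i][j]==0):
--         return True;
--     else:
--         if(i>len(map)-1 or j>len(map[0])-1 or map[i][j]!=0):
--             return False;
--         else:
--             return swimJudge(i+1,j,map) or swimJudge(i,j+1,map);
-- ===== SOURCE B (Python) =====
-- def swimJudge(i, j, map):
--     # Bottom-up DP over the subgrid [i..m-1] x [j..n-1] instead of A's
--     # exponential branching recursion: one row of the table at a time.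
--     m = len(map)
--     n = len(map[0])
--     if i > m - 1 or j > n - 1:
--         return False                    # start lies outside the grid: unreachable
--     below = []                          # table row beneath the current one; [] = no reachable cells
--     for t in range(m - 1, i - 1, -1):
--         cur = []                        # columns u+1 .. n-1 of row t, increasing column order
--         for u in range(n - 1, j - 1, -1):
--             if map[t][u] != 0:
--                 cell = False
--             elif t == m - 1 and u == n - 1:
--                 cell = True
--             else:
--                 down = below[u - j] if below else False
--                 right = cur[0] if cur else False
--                 cell = down or right
--             cur = [cell] + cur
--         below = cur
--     return below[0] if below else False
-- ===== Notes on version B (the rewrite author's own statement) =====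
-- stated objective: alternative
-- what changed: A explores down/right paths by branching recursion (worst-case exponential); B fills a bottom-up dynamic-programming table one row at a time, each cell computed once from its down and right neighbours.
-- outside the precondition, e.g. on swimJudge(0, 0, [[1, 0], [0]]): A returns False, B raises IndexError
import Mathlib
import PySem

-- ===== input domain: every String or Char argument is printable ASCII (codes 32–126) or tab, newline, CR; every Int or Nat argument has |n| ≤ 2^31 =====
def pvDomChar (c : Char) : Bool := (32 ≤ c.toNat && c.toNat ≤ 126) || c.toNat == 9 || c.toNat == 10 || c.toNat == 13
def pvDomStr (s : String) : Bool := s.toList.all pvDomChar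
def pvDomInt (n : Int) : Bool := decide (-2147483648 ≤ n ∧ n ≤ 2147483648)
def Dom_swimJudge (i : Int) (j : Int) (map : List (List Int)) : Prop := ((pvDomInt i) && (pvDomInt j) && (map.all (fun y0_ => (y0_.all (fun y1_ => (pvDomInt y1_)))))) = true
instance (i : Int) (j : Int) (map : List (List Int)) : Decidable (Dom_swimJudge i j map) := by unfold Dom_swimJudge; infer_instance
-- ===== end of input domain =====

-- B replaces A's branching path recursion by a bottom-up DP table filled row by row (alternative algorithm).

-- ===== PORT A =====
-- shared helper: map[t][u]; Pre_ keeps every evaluated access inside Python's (possibly negative) index range, so getD defaults are never the value used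
def pvAt (mp : List (List Int)) (t u : Int) : Int :=
  (PySem.List.pyGet? ((PySem.List.pyGet? mp t).getD []) u).getD 0

def swimJudge (i : Int) (j : Int) (map : List (List Int)) : Bool :=
  if i = (map.length : Int) - 1 ∧ j = (((PySem.List.pyGet? map 0).getD []).length : Int) - 1 ∧ pvAt map i j = 0 then
    true
  else if h2 : i > (map.length : Int) - 1 ∨ j > (((PySem.List.pyGet? map 0).getD []).length : Int) - 1 ∨ pvAt map i j ≠ 0 then
    false
  else
    swimJudge (i + 1) j map || swimJudge i (j + 1) map
termination_by (((map.length : Int) - i) + ((((PySem.List.pyGet? map 0).getD []).length : Int) - j)).toNat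
decreasing_by all_goals (push Not at h2; omega)

-- ===== PORT B =====
def pvCell (mp : List (List Int)) (m n j : Int) (below cur : List Bool) (t u : Int) : Bool :=
  if pvAt mp t u ≠ 0 then false
  else if t = m - 1 ∧ u = n - 1 then true
  else
    (if below ≠ [] then (PySem.List.pyGet? below (u - j)).getD false else false) ||
    (if cur ≠ [] then (PySem.List.pyGet? cur 0).getD false else false)

def pvRowB (mp : List (List Int)) (m n j t : Int) (below : List Bool) : List Bool :=
  (PySem.List.pyRange (n - 1) (j - 1) (-1)).foldl
    (fun cur u => pvCell mp m n j below cur t u :: cur) []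

def swimJudge_alt (i : Int) (j : Int) (map : List (List Int)) : Bool :=
  let m : Int := map.length
  let n : Int := ((PySem.List.pyGet? map 0).getD []).length
  if i > m - 1 ∨ j > n - 1 then false
  else
    let below := (PySem.List.pyRange (m - 1) (i - 1) (-1)).foldl
      (fun below t => pvRowB map m n j t below) []
    if below ≠ [] then (PySem.List.pyGet? below 0).getD false else false

-- ===== PRECONDITION & SPEC =====
-- Pre_ excludes empty grids and — when the start cell lies inside the grid's index rectangle — ragged
-- (non-rectangular) grids and start indices below Python's negative-index range, on which A or B can raise
-- IndexError (on some ragged grids A's short-circuiting recursion still returns a value while B, which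
-- inspects every cell of the subgrid, raises).
def Pre_swimJudge (i : Int) (j : Int) (map : List (List Int)) : Prop :=
  map ≠ [] ∧
    (i > (map.length : Int) - 1 ∨ j > ((map.headD []).length : Int) - 1 ∨
      ((∀ row ∈ map, row.length = (map.headD []).length) ∧
        -(map.length : Int) ≤ i ∧ -((map.headD []).length : Int) ≤ j))
instance (i : Int) (j : Int) (map : List (List Int)) : Decidable (Pre_swimJudge i j map) := by
  unfold Pre_swimJudge; infer_instance

def pvWitness_swimJudge : Int × Int × List (List Int) := (0, 0, [[0, 0], [1, 0]])

def Spec_swimJudge (i : Int) (j : Int) (map : List (List Int)) (out : Bool) : Prop := out = swimJudge_alt i j map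
instance (i : Int) (j : Int) (map : List (List Int)) (out : Bool) : Decidable (Spec_swimJudge i j map out) := by unfold Spec_swimJudge; infer_instance

-- ===== CLAIM (what is proved, stated in full; the proofs are below) =====
def Claim_equal_swimJudge : Prop := ∀ (i : Int) (j : Int) (map : List (List Int)), Dom_swimJudge i j map → Pre_swimJudge i j map → Spec_swimJudge i j map (swimJudge i j map)

-- ===== LEMMAS AND PROOFS =====

-- A returns False strictly below the last row
theorem pv_out_row (mp : List (List Int)) (t u : Int) (ht : (mp.length : Int) - 1 < t) :
    swimJudge t u mp = false := by
  rw [swimJudge]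
  rw [if_neg (by omega), dif_pos (by omega)]

-- A returns False strictly right of the last column
theorem pv_out_col (mp : List (List Int)) (t u : Int)
    (hu : (((PySem.List.pyGet? mp 0).getD []).length : Int) - 1 < u) :
    swimJudge t u mp = false := by
  rw [swimJudge]
  rw [if_neg (by omega), dif_pos (by omega)]

-- A's recursion, reshaped as the DP cell recurrence, inside the grid
theorem pv_step (mp : List (List Int)) (t u : Int)
    (ht : t ≤ (mp.length : Int) - 1)
    (hu : u ≤ (((PySem.List.pyGet? mp 0).getD []).length : Int) - 1) :
    swimJudge t u mp =
      if pvAt mp t u ≠ 0 then false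
      else if t = (mp.length : Int) - 1 ∧ u = (((PySem.List.pyGet? mp 0).getD []).length : Int) - 1 then true
      else swimJudge (t + 1) u mp || swimJudge t (u + 1) mp := by
  rw [swimJudge]
  by_cases hz : pvAt mp t u = 0
  · by_cases hc : t = (mp.length : Int) - 1 ∧ u = (((PySem.List.pyGet? mp 0).getD []).length : Int) - 1
    · rw [if_pos ⟨hc.1, hc.2, hz⟩, if_neg (by simp [hz]), if_pos hc]
    · rw [if_neg (by tauto), dif_neg (by push Not; exact ⟨by omega, by omega, hz⟩),
        if_neg (by simp [hz]), if_neg hc]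
  · rw [if_neg (by tauto), dif_pos (by tauto), if_pos (by tauto)]

theorem pv_pyGet?_cons_zero {α : Type} (a : α) (l : List α) :
    PySem.List.pyGet? (a :: l) 0 = some a := by
  simp [PySem.List.pyGet?, PySem.List.pyIdx?]

theorem pv_pyGet?_cons_pos {α : Type} (a : α) (l : List α) (k : Int) (hk : 1 ≤ k) :
    PySem.List.pyGet? (a :: l) k = PySem.List.pyGet? l (k - 1) := by
  rw [show k = ((k - 1) + 1 : Int) by ring]
  rw [show ((k-1) + 1 : Int) = (((k-1).toNat : Int) + 1) by omega]
  rw [PySem.List.pyGet?_cons_succ]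
  congr 1; omega

-- "c is rows t's table, columns u..n-1": emptiness and indexed lookup
def pvRowSpec (mp : List (List Int)) (t u : Int) (c : List Bool) : Prop :=
  (c = [] ↔ (((PySem.List.pyGet? mp 0).getD []).length : Int) - 1 < u) ∧
  ∀ v, u ≤ v → v ≤ (((PySem.List.pyGet? mp 0).getD []).length : Int) - 1 →
    PySem.List.pyGet? c (v - u) = some (swimJudge t v mp)

-- "b is row t of the table (columns j..n-1), empty meaning all-False"
def pvBelowSpec (mp : List (List Int)) (j t : Int) (b : List Bool) : Prop :=
  ∀ v, j ≤ v → v ≤ (((PySem.List.pyGet? mp 0).getD []).length : Int) - 1 →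
    (if b ≠ [] then (PySem.List.pyGet? b (v - j)).getD false else false) = swimJudge t v mp

-- inner loop: folding columns u0 down to j onto a correct suffix yields row t's full table
theorem pv_inner (mp : List (List Int)) (j t : Int) (below : List Bool)
    (ht : t ≤ (mp.length : Int) - 1)
    (hb : pvBelowSpec mp j (t + 1) below) :
    ∀ (k : Nat) (u0 : Int) (c0 : List Bool), (u0 - (j - 1)).toNat = k → j - 1 ≤ u0 →
      u0 ≤ (((PySem.List.pyGet? mp 0).getD []).length : Int) - 1 →
      pvRowSpec mp t (u0 + 1) c0 →
      pvRowSpec mp t j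
        ((PySem.List.pyRange u0 (j - 1) (-1)).foldl
          (fun cur u => pvCell mp (mp.length : Int) (((PySem.List.pyGet? mp 0).getD []).length : Int) j below cur t u :: cur) c0) := by
  intro k
  induction k with
  | zero =>
    intro u0 c0 hk h1 _ h2
    have : u0 = j - 1 := by omega
    subst this
    rw [PySem.List.pyRange_neg_one_eq_nil (le_refl _)]
    simpa using h2
  | succ k ih =>
    intro u0 c0 hk h1 hun h2
    have hlt : j - 1 < u0 := by omega
    rw [PySem.List.pyRange_neg_one_cons hlt]
    simp only [List.foldl_cons]
    have hcell : pvCell mp (mp.length : Int) (((PySem.List.pyGet? mp 0).getD []).length : Int) j below c0 t u0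
        = swimJudge t u0 mp := by
      rw [pv_step mp t u0 ht hun]
      unfold pvCell
      by_cases hz : pvAt mp t u0 ≠ 0
      · rw [if_pos hz, if_pos hz]
      · rw [if_neg hz, if_neg hz]
        by_cases hc : t = (mp.length : Int) - 1 ∧ u0 = (((PySem.List.pyGet? mp 0).getD []).length : Int) - 1
        · rw [if_pos hc, if_pos hc]
        · rw [if_neg hc, if_neg hc]
          have hdown : (if below ≠ [] then (PySem.List.pyGet? below (u0 - j)).getD false else false)
              = swimJudge (t + 1) u0 mp := hb u0 (by omega) hun
          have hright : (if c0 ≠ [] then (PySem.List.pyGet? c0 0).getD false else false)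
              = swimJudge t (u0 + 1) mp := by
            by_cases hv : u0 + 1 ≤ (((PySem.List.pyGet? mp 0).getD []).length : Int) - 1
            · have hne : c0 ≠ [] := by
                intro hnil
                have := h2.1.mp hnil
                omega
              rw [if_pos hne]
              have := h2.2 (u0 + 1) le_rfl hv
              rw [show (u0 + 1 - (u0 + 1) : Int) = 0 by ring] at this
              rw [this]; rfl
            · have hnil : c0 = [] := h2.1.mpr (by omega)
              rw [pv_out_col mp t (u0 + 1) (by omega)]
              simp [hnil]
          rw [hdown, hright]
    apply ih (u0 - 1) _ (by omega) (by omega) (by omega)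
    rw [show (u0 - 1 + 1 : Int) = u0 by ring]
    constructor
    · constructor
      · intro h; exact absurd h (List.cons_ne_nil _ _)
      · intro h; omega
    · intro v hv hvn
      by_cases hvu : v = u0
      · subst hvu
        rw [show (v - v : Int) = 0 by ring, pv_pyGet?_cons_zero, hcell]
      · rw [pv_pyGet?_cons_pos _ _ _ (by omega)]
        have := h2.2 v (by omega) hvn
        rw [show (v - u0 - 1 : Int) = v - (u0 + 1) by ring]
        exact this

theorem pv_row (mp : List (List Int)) (j t : Int) (below : List Bool)
    (ht : t ≤ (mp.length : Int) - 1)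
    (hb : pvBelowSpec mp j (t + 1) below) :
    pvBelowSpec mp j t
      (pvRowB mp (mp.length : Int) (((PySem.List.pyGet? mp 0).getD []).length : Int) j t below) := by
  unfold pvRowB
  by_cases hjn : j - 1 ≤ (((PySem.List.pyGet? mp 0).getD []).length : Int) - 1
  · have base : pvRowSpec mp t ((((PySem.List.pyGet? mp 0).getD []).length : Int) - 1 + 1) [] := by
      constructor
      · constructor
        · intro _; omega
        · intro _; rfl
      · intro v hv hvn; omega
    have H := pv_inner mp j t below ht hb
      ((((PySem.List.pyGet? mp 0).getD []).length : Int) - 1 - (j - 1)).toNat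
      ((((PySem.List.pyGet? mp 0).getD []).length : Int) - 1) [] rfl hjn le_rfl base
    intro v hv hvn
    have hne := H.1
    have hval := H.2 v hv hvn
    rw [if_pos (by intro hnil; have := hne.mp hnil; omega), hval]
    rfl
  · rw [PySem.List.pyRange_neg_one_eq_nil (by omega)]
    intro v hv hvn; omega

-- outer loop
theorem pv_outer (mp : List (List Int)) (i j : Int) :
    ∀ (k : Nat) (t0 : Int) (b0 : List Bool), (t0 - (i - 1)).toNat = k → i - 1 ≤ t0 → t0 ≤ (mp.length : Int) - 1 →
      pvBelowSpec mp j (t0 + 1) b0 →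
      pvBelowSpec mp j i
        ((PySem.List.pyRange t0 (i - 1) (-1)).foldl
          (fun below t => pvRowB mp (mp.length : Int) (((PySem.List.pyGet? mp 0).getD []).length : Int) j t below) b0) := by
  intro k
  induction k with
  | zero =>
    intro t0 b0 hk h1 _ hb
    have : t0 = i - 1 := by omega
    subst this
    rw [PySem.List.pyRange_neg_one_eq_nil (le_refl _)]
    simpa using hb
  | succ k ih =>
    intro t0 b0 hk h1 hm hb
    have hlt : i - 1 < t0 := by omega
    rw [PySem.List.pyRange_neg_one_cons hlt]
    simp only [List.foldl_cons]
    exact ih (t0 - 1) _ (by omega) (by omega) (by omega)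
      (by rw [show (t0 - 1 + 1 : Int) = t0 by ring]; exact pv_row mp j t0 b0 hm hb)

theorem pv_main (i j : Int) (mp : List (List Int)) :
    swimJudge i j mp = swimJudge_alt i j mp := by
  unfold swimJudge_alt
  by_cases hg : i > (mp.length : Int) - 1 ∨ j > (((PySem.List.pyGet? mp 0).getD []).length : Int) - 1
  · rw [if_pos hg]
    rcases hg with hg | hg
    · exact pv_out_row mp i j hg
    · exact pv_out_col mp i j hg
  · rw [if_neg hg]
    push Not at hg
    have hb0 : pvBelowSpec mp j ((mp.length : Int) - 1 + 1) [] := by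
      intro v hv hvn
      rw [show ((mp.length : Int) - 1 + 1) = (mp.length : Int) by ring,
        pv_out_row mp (mp.length : Int) v (by omega)]
      rfl
    have H := pv_outer mp i j (((mp.length : Int) - 1) - (i - 1)).toNat ((mp.length : Int) - 1) []
      rfl (by omega) le_rfl hb0
    have := H j le_rfl (by omega)
    rw [show (j - j : Int) = 0 by ring] at this
    exact this.symm

-- ===== VERDICT (by name: the statement is the Claim_ definition above) =====
theorem swimJudge_spec : Claim_equal_swimJudge := by
  intro i j mp _ _
  unfold Spec_swimJudge
  exact pv_main i j mp
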